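-- pv_equiv track=rewrite | github.com/Palash-oss/TIMETABLE | main.py | assign_teacher_by_expertise
-- ===== SOURCE A (Python) =====
-- def assign_teacher_by_expertise(subject, teachers):
--     """Assign teacher based on subject and expertise with better matching"""
--     subject_name = subject.get('name', '').lower()
--     subject_code = subject.get('code', '')
--
--     # Extract department from subject code (e.g., CS301 -> CS, ECE301 -> ECE)
--     subject_dept = subject_code[:2].upper() if len(subject_code) >= 2 else ''
--     if subject_dept in ['EV', 'PS', 'EC', 'MG', 'EN']:  # Handle special cases
--         subject_dept_map = {
--             'EV': 'ENV',
--             'PS': 'PSY',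
--             'EC': 'ECO',
--             'MG': 'MGT',
--             'EN': 'ENT'
--         }
--         subject_dept = subject_dept_map.get(subject_dept, subject_dept)
--
--     # First, try exact department match
--     for teacher in teachers:
--         teacher_dept = teacher.get('department', '')
--         if teacher_dept == subject_dept:
--             return teacher
--
--     # Then try specialization matching
--     for teacher in teachers:
--         specialization = teacher.get('specialization', '').lower()
--
--         # Subject-specific matching
--         if ('computer' in subject_name or 'software' in subject_name or 'programming' in subject_name) and 'computer' in specialization:
--             return teacher
--         elif ('electronics' in subject_name or 'circuit' in subject_name or 'digital' in subject_name) and 'electronics' in specialization: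
--             return teacher
--         elif ('mechanical' in subject_name or 'thermo' in subject_name or 'fluid' in subject_name) and 'mechanical' in specialization:
--             return teacher
--         elif ('civil' in subject_name or 'structural' in subject_name or 'concrete' in subject_name) and 'civil' in specialization:
--             return teacher
--         elif ('electrical' in subject_name or 'power' in subject_name) and 'electrical' in specialization:
--             return teacher
--         elif ('chemical' in subject_name or 'process' in subject_name) and 'chemical' in specialization:
--             return teacher
--         elif 'environmental' in subject_name and 'environmental' in specialization:
--             return teacher
--         elif 'management' in subject_name and 'management' in specialization:
--             return teacher
--         elif 'economics' in subject_name and 'economics' in specialization: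
--             return teacher
--
--     # Return first available teacher as fallback
--     return teachers[0] if teachers else None
-- ===== SOURCE B (Python) =====
-- RULES = [
--     (('computer', 'software', 'programming'), 'computer'),
--     (('electronics', 'circuit', 'digital'), 'electronics'),
--     (('mechanical', 'thermo', 'fluid'), 'mechanical'),
--     (('civil', 'structural', 'concrete'), 'civil'),
--     (('electrical', 'power'), 'electrical'),
--     (('chemical', 'process'), 'chemical'),
--     (('environmental',), 'environmental'),
--     (('management',), 'management'),
--     (('economics',), 'economics'),
-- ]
--
-- DEPT_REMAP = {'EV': 'ENV', 'PS': 'PSY', 'EC': 'ECO', 'MG': 'MGT', 'EN': 'ENT'}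
--
--
-- def assign_teacher_by_expertise(subject, teachers):
--     """Single pass: a department match returns immediately; the first
--     specialization match is remembered as a candidate for after the loop."""
--     name = subject.get('name', '').lower()
--     code = subject.get('code', '')
--     dept = code[:2].upper() if len(code) >= 2 else ''
--     dept = DEPT_REMAP.get(dept, dept)
--     active = [kw for names, kw in RULES if any(n in name for n in names)]
--     candidate = None
--     for t in teachers:
--         if t.get('department', '') == dept:
--             return t
--         if candidate is None and any(kw in t.get('specialization', '').lower() for kw in active):
--             candidate = t
--     if candidate is not None:
--         return candidate
--     return teachers[0] if teachers else None
-- ===== Notes on version B (the rewrite author's own statement) =====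
-- stated objective: simpler
-- what changed: Replaces A's two full passes over teachers and nine-branch elif chain by a keyword table filtered once into the active keywords plus a single pass that returns a department match immediately and remembers the first specialization match as a candidate.
import Mathlib
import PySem

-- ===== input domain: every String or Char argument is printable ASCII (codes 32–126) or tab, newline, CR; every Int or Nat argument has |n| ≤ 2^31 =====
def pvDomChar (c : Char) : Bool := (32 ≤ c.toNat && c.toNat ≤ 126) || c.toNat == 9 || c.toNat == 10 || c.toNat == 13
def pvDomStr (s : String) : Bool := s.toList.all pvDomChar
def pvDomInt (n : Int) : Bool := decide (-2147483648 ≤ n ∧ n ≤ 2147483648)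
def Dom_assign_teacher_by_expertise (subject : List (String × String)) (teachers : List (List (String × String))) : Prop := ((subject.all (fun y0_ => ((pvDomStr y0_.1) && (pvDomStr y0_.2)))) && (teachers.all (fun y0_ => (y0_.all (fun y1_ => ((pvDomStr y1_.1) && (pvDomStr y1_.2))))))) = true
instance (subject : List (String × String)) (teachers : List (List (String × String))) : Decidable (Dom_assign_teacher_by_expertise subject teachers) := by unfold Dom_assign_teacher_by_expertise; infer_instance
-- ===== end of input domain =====

-- B replaces A's two full passes and nine-branch elif chain by a keyword table filtered
-- once into the active keywords plus a single pass remembering the first specialization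
-- candidate (objective: simpler).

-- ===== PORT A =====
-- dict.get(k, dflt) on a dict given as an association list: first match
def pvGetD (d : List (String × String)) (k dflt : String) : String :=
  match d.find? (fun p => p.1 == k) with
  | some p => p.2
  | none => dflt

def pvDeptMap : PySem.Dict String String :=
  PySem.Dict.ofList [("EV", "ENV"), ("PS", "PSY"), ("EC", "ECO"), ("MG", "MGT"), ("EN", "ENT")]

-- A's elif chain on (subject_name, specialization) — branches in source order
def pvSpecChainA (sn spec : String) : Bool :=
  if (PySem.Str.isIn "computer" sn || PySem.Str.isIn "software" sn || PySem.Str.isIn "programming" sn) && PySem.Str.isIn "computer" spec then true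
  else if (PySem.Str.isIn "electronics" sn || PySem.Str.isIn "circuit" sn || PySem.Str.isIn "digital" sn) && PySem.Str.isIn "electronics" spec then true
  else if (PySem.Str.isIn "mechanical" sn || PySem.Str.isIn "thermo" sn || PySem.Str.isIn "fluid" sn) && PySem.Str.isIn "mechanical" spec then true
  else if (PySem.Str.isIn "civil" sn || PySem.Str.isIn "structural" sn || PySem.Str.isIn "concrete" sn) && PySem.Str.isIn "civil" spec then true
  else if (PySem.Str.isIn "electrical" sn || PySem.Str.isIn "power" sn) && PySem.Str.isIn "electrical" spec then true
  else if (PySem.Str.isIn "chemical" sn || PySem.Str.isIn "process" sn) && PySem.Str.isIn "chemical" spec then true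
  else if PySem.Str.isIn "environmental" sn && PySem.Str.isIn "environmental" spec then true
  else if PySem.Str.isIn "management" sn && PySem.Str.isIn "management" spec then true
  else if PySem.Str.isIn "economics" sn && PySem.Str.isIn "economics" spec then true
  else false

def assign_teacher_by_expertise (subject : List (String × String)) (teachers : List (List (String × String))) : Option (List (String × String)) :=
  let subject_name := PySem.Str.lower (pvGetD subject "name" "")
  let subject_code := pvGetD subject "code" ""
  let sd0 := if (2 : Int) ≤ PySem.Str.len subject_code
             then PySem.Str.upper (PySem.Str.slice subject_code none (some 2)) else ""
  let subject_dept :=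
    if sd0 = "EV" ∨ sd0 = "PS" ∨ sd0 = "EC" ∨ sd0 = "MG" ∨ sd0 = "EN"
    then PySem.Dict.getD pvDeptMap sd0 sd0 else sd0
  match teachers.find? (fun t => pvGetD t "department" "" == subject_dept) with
  | some t => some t
  | none =>
    match teachers.find? (fun t => pvSpecChainA subject_name (PySem.Str.lower (pvGetD t "specialization" ""))) with
    | some t => some t
    | none => teachers.head?

-- ===== PORT B =====
def pvRules : List (List String × String) :=
  [(["computer", "software", "programming"], "computer"),
   (["electronics", "circuit", "digital"], "electronics"),
   (["mechanical", "thermo", "fluid"], "mechanical"),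
   (["civil", "structural", "concrete"], "civil"),
   (["electrical", "power"], "electrical"),
   (["chemical", "process"], "chemical"),
   (["environmental"], "environmental"),
   (["management"], "management"),
   (["economics"], "economics")]

-- the single pass: store first specialization match, return a department match at once
def pvLoopB (dept : String) (active : List String) (cand : Option (List (String × String))) :
    List (List (String × String)) → Option (List (String × String))
  | [] => cand
  | t :: rest =>
    if pvGetD t "department" "" == dept then some t
    else pvLoopB dept active
      (if cand.isNone && active.any (fun kw => PySem.Str.isIn kw (PySem.Str.lower (pvGetD t "specialization" "")))
       then some t else cand) rest

def assign_teacher_by_expertise_alt (subject : List (String × String)) (teachers : List (List (String × String))) : Option (List (String × String)) :=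
  let name := PySem.Str.lower (pvGetD subject "name" "")
  let code := pvGetD subject "code" ""
  let dept0 := if (2 : Int) ≤ PySem.Str.len code
               then PySem.Str.upper (PySem.Str.slice code none (some 2)) else ""
  let dept := PySem.Dict.getD pvDeptMap dept0 dept0
  let active := (pvRules.filter (fun r => r.1.any (fun n => PySem.Str.isIn n name))).map (·.2)
  match pvLoopB dept active none teachers with
  | some t => some t
  | none => teachers.head?

-- ===== PRECONDITION & SPEC =====
def Spec_assign_teacher_by_expertise (subject : List (String × String)) (teachers : List (List (String × String))) (out : Option (List (String × String))) : Prop := out = assign_teacher_by_expertise_alt subject teachers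
instance (subject : List (String × String)) (teachers : List (List (String × String))) (out : Option (List (String × String))) : Decidable (Spec_assign_teacher_by_expertise subject teachers out) := by unfold Spec_assign_teacher_by_expertise; infer_instance

-- ===== CLAIM (what is proved, stated in full; the proofs are below) =====
def Claim_equal_assign_teacher_by_expertise : Prop := ∀ (subject : List (String × String)) (teachers : List (List (String × String))), Dom_assign_teacher_by_expertise subject teachers → Spec_assign_teacher_by_expertise subject teachers (assign_teacher_by_expertise subject teachers)

-- ===== LEMMAS AND PROOFS =====

-- A's membership-guarded remap equals an unconditional getD with default
lemma dept_remap_eq (s : String) :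
    (if s = "EV" ∨ s = "PS" ∨ s = "EC" ∨ s = "MG" ∨ s = "EN"
     then PySem.Dict.getD pvDeptMap s s else s) = PySem.Dict.getD pvDeptMap s s := by
  split
  · rfl
  · rename_i h
    rw [not_or, not_or, not_or, not_or] at h
    obtain ⟨h1, h2, h3, h4, h5⟩ := h
    have hd : pvDeptMap = PySem.Dict.mk [("EV", "ENV"), ("PS", "PSY"), ("EC", "ECO"), ("MG", "MGT"), ("EN", "ENT")] := by decide
    have e1 : ("EV" == s) = false := by simp [Ne.symm h1]
    have e2 : ("PS" == s) = false := by simp [Ne.symm h2]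
    have e3 : ("EC" == s) = false := by simp [Ne.symm h3]
    have e4 : ("MG" == s) = false := by simp [Ne.symm h4]
    have e5 : ("EN" == s) = false := by simp [Ne.symm h5]
    rw [hd]
    simp [PySem.Dict.getD, PySem.Dict.get?, List.find?, e1, e2, e3, e4, e5]

lemma ite_true_or (c b : Bool) : (if c = true then true else b) = (c || b) := by
  cases c <;> simp

lemma any_filter_map {A B : Type} (l : List A) (p : A -> Bool) (f : A -> B) (q : B -> Bool) :
    ((l.filter p).map f).any q = l.any (fun r => p r && q (f r)) := by
  induction l with
  | nil => rfl
  | cons x xs ih => by_cases h : p x = true <;> simp [h, ih]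

-- A's elif chain = any active keyword occurs in the specialization
lemma spec_chain_eq (sn spec : String) :
    pvSpecChainA sn spec =
      ((pvRules.filter (fun r => r.1.any (fun n => PySem.Str.isIn n sn))).map (·.2)).any
        (fun kw => PySem.Str.isIn kw spec) := by
  unfold pvSpecChainA
  rw [any_filter_map]
  simp only [pvRules, List.any_cons, List.any_nil, Bool.or_false, ite_true_or, Bool.or_assoc]

-- the single pass = dept-scan, else candidate, else spec-scan
lemma loopB_eq (dept : String) (active : List String) (cand : Option (List (String × String)))
    (ts : List (List (String × String))) :
    pvLoopB dept active cand ts =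
      match ts.find? (fun t => pvGetD t "department" "" == dept) with
      | some t => some t
      | none => cand.orElse (fun _ => ts.find? (fun t => active.any (fun kw => PySem.Str.isIn kw (PySem.Str.lower (pvGetD t "specialization" ""))))) := by
  induction ts generalizing cand with
  | nil => cases cand <;> simp [pvLoopB, Option.orElse]
  | cons t rest ih =>
    simp only [pvLoopB]
    by_cases hd : (pvGetD t "department" "" == dept) = true
    · rw [if_pos hd, List.find?_cons_of_pos (p := fun t => pvGetD t "department" "" == dept) hd]
    · rw [if_neg hd, ih, List.find?_cons_of_neg (p := fun t => pvGetD t "department" "" == dept) hd]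
      cases hfd : List.find? (fun t => pvGetD t "department" "" == dept) rest with
      | some u => rfl
      | none =>
        cases cand with
        | some c => simp [Option.orElse]
        | none =>
          by_cases hs : (active.any (fun kw => PySem.Str.isIn kw (PySem.Str.lower (pvGetD t "specialization" "")))) = true
          · simp only [Option.isNone_none, Bool.true_and]
            rw [if_pos hs, List.find?_cons_of_pos (p := fun t => active.any (fun kw => PySem.Str.isIn kw (PySem.Str.lower (pvGetD t "specialization" "")))) hs]
            rfl
          · simp only [Option.isNone_none, Bool.true_and]
            rw [if_neg hs, List.find?_cons_of_neg (p := fun t => active.any (fun kw => PySem.Str.isIn kw (PySem.Str.lower (pvGetD t "specialization" "")))) hs]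

-- ===== VERDICT (by name: the statement is the Claim_ definition above) =====
theorem assign_teacher_by_expertise_spec : Claim_equal_assign_teacher_by_expertise := by
  intro subject teachers _
  unfold Spec_assign_teacher_by_expertise assign_teacher_by_expertise assign_teacher_by_expertise_alt
  simp only [dept_remap_eq]
  rw [loopB_eq]
  simp only [← spec_chain_eq]
  cases teachers.find? (fun t => pvGetD t "department" "" ==
      PySem.Dict.getD pvDeptMap
        (if (2 : Int) ≤ PySem.Str.len (pvGetD subject "code" "")
         then PySem.Str.upper (PySem.Str.slice (pvGetD subject "code" "") none (some 2)) else "")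
        (if (2 : Int) ≤ PySem.Str.len (pvGetD subject "code" "")
         then PySem.Str.upper (PySem.Str.slice (pvGetD subject "code" "") none (some 2)) else "")) with
  | some t => rfl
  | none =>
    cases teachers.find? (fun t => pvSpecChainA (PySem.Str.lower (pvGetD subject "name" ""))
        (PySem.Str.lower (pvGetD t "specialization" ""))) <;> simp [Option.orElse]
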